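-- pv_equiv track=rewrite | github.com/utensils/nixmcp | mcp_nixos/clients/darwin/darwin_client.py | _extract_description_from_text
-- ===== SOURCE A (Python) =====
-- def _extract_description_from_text(full_text: str) -> str:
--     """Extracts the main description text before metadata markers."""
--     markers = ["*Type:*", "*Default:*", "*Example:*", "*Declared by:*"]
--     first_marker_pos = len(full_text)
--     for marker in markers:
--         pos = full_text.find(marker)
--         if pos != -1:
--             first_marker_pos = min(first_marker_pos, pos)
--     return full_text[:first_marker_pos].strip()
-- ===== SOURCE B (Python) =====
-- def _extract_description_from_text(full_text: str) -> str:
--     """Extracts the main description text before metadata markers."""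
--     markers = ("*Type:*", "*Default:*", "*Example:*", "*Declared by:*")
--     for i in range(len(full_text)):
--         if full_text.startswith(markers, i):
--             return full_text[:i].strip()
--     return full_text.strip()
-- ===== Notes on version B (the rewrite author's own statement) =====
-- stated objective: alternative
-- what changed: B replaces A's four separate full-string .find scans with a running minimum by a single left-to-right scan that stops at the first position where any of the four markers starts (str.startswith with a tuple and a start offset).
import Mathlib
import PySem

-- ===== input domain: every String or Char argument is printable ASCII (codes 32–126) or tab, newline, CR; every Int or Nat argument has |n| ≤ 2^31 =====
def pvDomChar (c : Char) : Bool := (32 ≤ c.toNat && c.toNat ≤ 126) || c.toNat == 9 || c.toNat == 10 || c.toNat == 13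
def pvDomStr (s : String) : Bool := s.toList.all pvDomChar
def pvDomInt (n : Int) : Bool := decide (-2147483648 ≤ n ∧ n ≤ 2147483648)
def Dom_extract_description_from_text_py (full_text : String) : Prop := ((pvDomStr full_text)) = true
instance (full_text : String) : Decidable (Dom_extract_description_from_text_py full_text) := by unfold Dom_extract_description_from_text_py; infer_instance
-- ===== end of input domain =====

-- B replaces A's four separate .find scans with a running minimum by a single
-- left-to-right scan stopping at the first position where any marker starts (alternative, same cost).

def pvMarkers : List String := ["*Type:*", "*Default:*", "*Example:*", "*Declared by:*"]

-- ===== PORT A =====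
def extract_description_from_text_py (full_text : String) : String :=
  let first_marker_pos : Int := pvMarkers.foldl
    (fun first_marker_pos marker =>
      let pos := PySem.Str.find full_text marker
      if pos ≠ -1 then min first_marker_pos pos else first_marker_pos)
    (full_text.length : Int)
  PySem.Str.strip (PySem.Str.slice full_text none (some first_marker_pos))

-- ===== PORT B =====
-- full_text.startswith(markers, i): some marker is a prefix of the text from position i on
def pvAnyMarkerAt (l : List Char) : Bool := pvMarkers.any (fun m => PySem.Chars.startswith l m.toList)

-- the 'for i in range(len(full_text))' loop of Source B: full is the whole text, suf = full.drop i
def pvAltGo (full : List Char) (i : Nat) : List Char → List Char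
  | [] => PySem.Chars.strip full
  | c :: rest =>
      if pvAnyMarkerAt (c :: rest) then PySem.Chars.strip (full.take i)
      else pvAltGo full (i + 1) rest

def extract_description_from_text_py_alt (full_text : String) : String :=
  String.ofList (pvAltGo full_text.toList 0 full_text.toList)

-- ===== PRECONDITION & SPEC =====
def Spec_extract_description_from_text_py (full_text : String) (out : String) : Prop := out = extract_description_from_text_py_alt full_text
instance (full_text : String) (out : String) : Decidable (Spec_extract_description_from_text_py full_text out) := by unfold Spec_extract_description_from_text_py; infer_instance

-- ===== CLAIM (what is proved, stated in full; the proofs are below) =====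
def Claim_equal_extract_description_from_text_py : Prop := ∀ (full_text : String), Dom_extract_description_from_text_py full_text → Spec_extract_description_from_text_py full_text (extract_description_from_text_py full_text)

-- ===== LEMMAS AND PROOFS =====

-- index of the first position carrying a marker, or length if none
def pvIdx : List Char → Nat
  | [] => 0
  | c :: rest => if pvAnyMarkerAt (c :: rest) then 0 else pvIdx rest + 1

theorem pvIdx_le (s : List Char) : pvIdx s ≤ s.length := by
  induction s with
  | nil => simp [pvIdx]
  | cons c rest ih =>
    simp only [pvIdx, List.length_cons]
    split <;> omega

theorem pvIdx_lt_false (s : List Char) : ∀ j < pvIdx s, pvAnyMarkerAt (s.drop j) = false := by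
  induction s with
  | nil => simp [pvIdx]
  | cons c rest ih =>
    intro j hj
    simp only [pvIdx] at hj
    split at hj
    · omega
    · match j with
      | 0 => simpa using ‹¬ pvAnyMarkerAt (c :: rest) = true›
      | Nat.succ j' =>
        simp only [List.drop_succ_cons]
        exact ih j' (by omega)

theorem pvIdx_eq_or (s : List Char) :
    pvAnyMarkerAt (s.drop (pvIdx s)) = true ∨ pvIdx s = s.length := by
  induction s with
  | nil => right; simp [pvIdx]
  | cons c rest ih =>
    by_cases h : pvAnyMarkerAt (c :: rest) = true
    · left; simpa [pvIdx, h] using h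
    · simp only [pvIdx, h]
      rcases ih with h1 | h1
      · left; simpa using h1
      · right; simp [h1]

theorem pvIdx_le_of_any (s : List Char) (j : Nat) (h : pvAnyMarkerAt (s.drop j) = true) :
    pvIdx s ≤ j := by
  by_contra hc
  have := pvIdx_lt_false s j (by omega)
  simp [this] at h

theorem pvAltGo_eq (suf : List Char) : ∀ (full : List Char) (i : Nat), suf = full.drop i →
    pvAltGo full i suf = PySem.Chars.strip (full.take (i + pvIdx suf)) := by
  induction suf with
  | nil =>
    intro full i h
    have hlen : full.length ≤ i := by
      have := congrArg List.length h
      simp [List.length_drop] at this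
      omega
    simp [pvAltGo, pvIdx, List.take_of_length_le hlen]
  | cons c rest ih =>
    intro full i h
    by_cases hm : pvAnyMarkerAt (c :: rest) = true
    · simp [pvAltGo, hm, pvIdx]
    · have hrest : rest = full.drop (i + 1) := by
        rw [← List.drop_drop, ← h]
        simp
      have := ih full (i + 1) hrest
      rw [show i + 1 + pvIdx rest = i + (pvIdx rest + 1) from by omega] at this
      simp [pvAltGo, hm, pvIdx, this]

-- characterize pvAnyMarkerAt
theorem pvAnyMarkerAt_iff (l : List Char) :
    pvAnyMarkerAt l = true ↔ ∃ m ∈ pvMarkers, m.toList <+: l := by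
  simp [pvAnyMarkerAt, List.any_eq_true, PySem.Chars.startswith_iff]

-- the A-side fold over any list of markers, for a fixed string s
theorem pvFold_le_init (s : String) (ms : List String) : ∀ acc : Int,
    ms.foldl (fun a m => if PySem.Str.find s m ≠ -1 then min a (PySem.Str.find s m) else a) acc ≤ acc := by
  induction ms with
  | nil => intro acc; simp
  | cons m ms ih =>
    intro acc
    simp only [List.foldl_cons]
    refine le_trans (ih _) ?_
    split <;> simp

theorem pvFold_le_find (s : String) (ms : List String) : ∀ (acc : Int) (m : String), m ∈ ms →
    PySem.Str.find s m ≠ -1 →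
    ms.foldl (fun a m => if PySem.Str.find s m ≠ -1 then min a (PySem.Str.find s m) else a) acc ≤ PySem.Str.find s m := by
  induction ms with
  | nil => intro _ m hm; simp at hm
  | cons m0 ms ih =>
    intro acc m hm hf
    rcases List.mem_cons.mp hm with rfl | hm'
    · simp only [List.foldl_cons, if_pos hf]
      exact le_trans (pvFold_le_init s ms _) (min_le_right _ _)
    · exact ih _ m hm' hf

theorem pvFold_cases (s : String) (ms : List String) : ∀ acc : Int,
    (ms.foldl (fun a m => if PySem.Str.find s m ≠ -1 then min a (PySem.Str.find s m) else a) acc = acc)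
    ∨ (∃ m ∈ ms, PySem.Str.find s m ≠ -1 ∧
        ms.foldl (fun a m => if PySem.Str.find s m ≠ -1 then min a (PySem.Str.find s m) else a) acc = PySem.Str.find s m) := by
  induction ms with
  | nil => intro acc; left; simp
  | cons m0 ms ih =>
    intro acc
    simp only [List.foldl_cons]
    by_cases hf : PySem.Str.find s m0 ≠ -1
    · rw [if_pos hf]
      rcases ih (min acc (PySem.Str.find s m0)) with h | ⟨m, hm, hf', h⟩
      · rcases le_total acc (PySem.Str.find s m0) with hle | hle
        · left; rw [h, min_eq_left hle]
        · right; exact ⟨m0, List.mem_cons_self, hf, by rw [h, min_eq_right hle]⟩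
      · right; exact ⟨m, List.mem_cons_of_mem _ hm, hf', h⟩
    · rw [if_neg hf]
      rcases ih acc with h | ⟨m, hm, hf', h⟩
      · left; exact h
      · right; exact ⟨m, List.mem_cons_of_mem _ hm, hf', h⟩

-- the fold computes exactly pvIdx of the character list
theorem pvFold_eq_idx (s : String) :
    pvMarkers.foldl (fun a m => if PySem.Str.find s m ≠ -1 then min a (PySem.Str.find s m) else a)
      (s.length : Int) = (pvIdx s.toList : Int) := by
  set L := s.toList with hL
  set P := pvMarkers.foldl (fun a m => if PySem.Str.find s m ≠ -1 then min a (PySem.Str.find s m) else a)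
      (s.length : Int) with hP
  have hlen : (s.length : Int) = (L.length : Int) := by simp [hL]
  have hfind : ∀ m : String, PySem.Str.find s m = PySem.Chars.find L m.toList := by
    intro m; simp [hL]
  -- P ≤ pvIdx L
  have h1 : P ≤ (pvIdx L : Int) := by
    rcases pvIdx_eq_or L with hany | heq
    · obtain ⟨m, hm, hpref⟩ := (pvAnyMarkerAt_iff _).mp hany
      have hinf : m.toList <:+: L := by
        exact ((List.infix_iff_prefix_suffix).mpr ⟨_, hpref, List.drop_suffix _ _⟩)
      have hne : PySem.Chars.find L m.toList ≠ -1 := (PySem.Chars.find_ne_neg_one_iff _ _).mpr hinf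
      have hpos : 0 ≤ PySem.Chars.find L m.toList := (PySem.Chars.find_nonneg_iff _ _).mpr hinf
      have hspec := (PySem.Chars.find_spec (s := L) (sub := m.toList) hpos).2
      have hle : (PySem.Chars.find L m.toList).toNat ≤ pvIdx L := by
        by_contra hc
        exact (hspec (pvIdx L) (by omega)) hpref
      have := pvFold_le_find s pvMarkers (s.length : Int) m hm (by rw [hfind]; exact hne)
      rw [← hP, hfind] at this
      omega
    · have := pvFold_le_init s pvMarkers (s.length : Int)
      rw [← hP] at this
      omega
  -- pvIdx L ≤ P
  have h2 : (pvIdx L : Int) ≤ P := by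
    rcases pvFold_cases s pvMarkers (s.length : Int) with h | ⟨m, hm, hne, h⟩
    · rw [← hP] at h
      have := pvIdx_le L
      omega
    · rw [← hP] at h
      rw [hfind] at hne h
      have hinf : m.toList <:+: L := (PySem.Chars.find_ne_neg_one_iff _ _).mp hne
      have hpos : 0 ≤ PySem.Chars.find L m.toList := (PySem.Chars.find_nonneg_iff _ _).mpr hinf
      have hpref := (PySem.Chars.find_spec (s := L) (sub := m.toList) hpos).1
      have hany : pvAnyMarkerAt (L.drop (PySem.Chars.find L m.toList).toNat) = true :=
        (pvAnyMarkerAt_iff _).mpr ⟨m, hm, hpref⟩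
      have := pvIdx_le_of_any L _ hany
      omega
  omega

-- ===== VERDICT (by name: the statement is the Claim_ definition above) =====
theorem extract_description_from_text_py_spec : Claim_equal_extract_description_from_text_py := by
  intro s _
  unfold Spec_extract_description_from_text_py extract_description_from_text_py extract_description_from_text_py_alt
  simp only [pvFold_eq_idx]
  rw [pvAltGo_eq s.toList s.toList 0 (by simp), Nat.zero_add]
  have h2 : (PySem.Str.strip (PySem.Str.slice s none (some (pvIdx s.toList : Int)))).toList
      = PySem.Chars.strip (s.toList.take (pvIdx s.toList)) := by
    simp [PySem.List.slice_to_natCast]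
  rw [← h2, String.ofList_toList]
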